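-- pv_equiv track=rewrite | github.com/rnjstpwls/BOJ_solvedac | class4/BOJ2448.py | cause_youre_my_star
-- ===== SOURCE A (Python) =====
-- def cause_youre_my_star(N):
--     if N == 3:
--         return ['  *  ', ' * * ', '*****']
--     result = []
--     tmp = cause_youre_my_star(N // 2)
--     for line in tmp:
--         result.append(' ' * (N // 2) + line + ' ' * (N // 2))
--     for line in tmp:
--         result.append(line + ' ' + line)
--
--     return result
-- ===== SOURCE B (Python) =====
-- def cause_youre_my_star(N):
--     sizes = []
--     while N > 3:
--         sizes.append(N)
--         N //= 2
--     if N != 3: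
--         raise ValueError('size must reduce to 3 by repeated halving')
--     tri = ['  *  ', ' * * ', '*****']
--     for n in reversed(sizes):
--         pad = ' ' * (n // 2)
--         tri = [pad + line + pad for line in tri] + [line + ' ' + line for line in tri]
--     return tri
-- ===== Notes on version B (the rewrite author's own statement) =====
-- stated objective: alternative
-- what changed: Replaces A's top-down recursion with an iterative build: collect the halving chain, validate it reaches 3 (ValueError instead of A's RecursionError, excluded by Pre_), then fold bottom-up with list comprehensions.
import Mathlib
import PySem

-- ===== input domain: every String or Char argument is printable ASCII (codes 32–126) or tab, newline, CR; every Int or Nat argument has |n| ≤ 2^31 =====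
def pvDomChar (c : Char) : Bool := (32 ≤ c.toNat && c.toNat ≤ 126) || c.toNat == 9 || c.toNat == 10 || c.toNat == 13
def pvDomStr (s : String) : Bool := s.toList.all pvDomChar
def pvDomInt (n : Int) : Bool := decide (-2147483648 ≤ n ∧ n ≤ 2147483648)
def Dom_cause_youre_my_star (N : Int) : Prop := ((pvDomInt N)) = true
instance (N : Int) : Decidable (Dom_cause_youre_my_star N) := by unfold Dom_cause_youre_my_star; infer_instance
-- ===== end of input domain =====

-- B replaces A's top-down recursion by an iterative build: collect the halving chain, then fold bottom-up (alternative decomposition, same cost).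

-- ' ' * n  (Python string repetition; exact: negative n gives '')
def pySpaces (n : Int) : String := String.ofList (List.replicate n.toNat ' ')

-- ===== PORT A =====
-- fuel-bounded transliteration of A's recursion; fuel 64 is never exhausted on inputs where A returns (chain length ≤ 31 within Dom)
def goA : Nat → Int → List String
  | 0, _ => []
  | f+1, N =>
    if N = 3 then ["  *  ", " * * ", "*****"]
    else
      let tmp := goA f (PySem.Int.floordiv N 2)
      let result := tmp.foldl (fun res line => res ++ [pySpaces (PySem.Int.floordiv N 2) ++ line ++ pySpaces (PySem.Int.floordiv N 2)]) []
      tmp.foldl (fun res line => res ++ [line ++ " " ++ line]) result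

def cause_youre_my_star (N : Int) : List String := goA 64 N

-- ===== PORT B =====
-- phase 1 of Source B: the while loop collecting sizes (fuel-bounded; 64 halvings always suffice within Dom);
-- returns the collected sizes together with the final value of N (checked against 3 by the validation step)
def bChain : Nat → Int → (List Int × Int)
  | 0, N => ([], N)
  | f+1, N => if N > 3 then let r := bChain f (PySem.Int.floordiv N 2); (N :: r.1, r.2) else ([], N)

-- phase 2 of Source B: one doubling step (the two list comprehensions)
def bStep (tri : List String) (n : Int) : List String :=
  let pad := pySpaces (PySem.Int.floordiv n 2)
  tri.map (fun line => pad ++ line ++ pad) ++ tri.map (fun line => line ++ " " ++ line)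

-- Source B raises ValueError when the chain does not end at 3; that input is outside Pre_, the port returns []
def cause_youre_my_star_alt (N : Int) : List String :=
  let r := bChain 64 N
  if r.2 = 3 then r.1.reverse.foldl bStep ["  *  ", " * * ", "*****"] else []

-- ===== PRECONDITION & SPEC =====
-- Pre_ excludes exactly the inputs whose repeated-halving chain never reaches 3, on which A raises
-- RecursionError; it admits N with ⌊N/2^k⌋ = 3 for some k (top two bits '11').  The bound k < 64 only
-- makes the ∃ decidable: every N in Dom (|N| ≤ 2^31) that A returns on has k ≤ 30, so no input in Dom
-- on which A returns is excluded.
def Pre_cause_youre_my_star (N : Int) : Prop := ∃ k : Nat, k < 64 ∧ 3 * 2 ^ k ≤ N ∧ N < 4 * 2 ^ k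
instance (N : Int) : Decidable (Pre_cause_youre_my_star N) := by unfold Pre_cause_youre_my_star; infer_instance
def pvWitness_cause_youre_my_star : Int := (12)

def Spec_cause_youre_my_star (N : Int) (out : List String) : Prop := out = cause_youre_my_star_alt N
instance (N : Int) (out : List String) : Decidable (Spec_cause_youre_my_star N out) := by unfold Spec_cause_youre_my_star; infer_instance

-- ===== CLAIM (what is proved, stated in full; the proofs are below) =====
def Claim_equal_cause_youre_my_star : Prop := ∀ (N : Int), Dom_cause_youre_my_star N → Pre_cause_youre_my_star N → Spec_cause_youre_my_star N (cause_youre_my_star N)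

-- ===== LEMMAS AND PROOFS =====

-- A's two append-loops compute B's two comprehensions
lemma stepA_eq_bStep (tmp : List String) (n : Int) :
    tmp.foldl (fun res line => res ++ [line ++ " " ++ line])
      (tmp.foldl (fun res line => res ++ [pySpaces (PySem.Int.floordiv n 2) ++ line ++ pySpaces (PySem.Int.floordiv n 2)]) []) = bStep tmp n := by
  rw [PySem.List.foldl_append_singleton_eq_map, PySem.List.foldl_append_singleton_eq_map]
  simp [bStep]

-- main invariant: on the chain interval [3·2^k, 4·2^k) with enough fuel, A's recursion equals B's fold
lemma chain_eq : ∀ (k : Nat) (f : Nat) (N : Int), k < f → 3 * 2 ^ k ≤ N → N < 4 * 2 ^ k →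
    (bChain f N).2 = 3 ∧ goA f N = (bChain f N).1.reverse.foldl bStep ["  *  ", " * * ", "*****"] := by
  intro k
  induction k with
  | zero =>
    intro f N hf h1 h2
    obtain ⟨f', rfl⟩ : ∃ f', f = f' + 1 := ⟨f - 1, by omega⟩
    have hN : N = 3 := by simp only [pow_zero, mul_one] at h1 h2; omega
    subst hN
    simp [goA, bChain]
  | succ k ih =>
    intro f N hf h1 h2
    obtain ⟨f', rfl⟩ : ∃ f', f = f' + 1 := ⟨f - 1, by omega⟩
    have hpow : (2:Int) ^ (k+1) = 2 * 2 ^ k := by ring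
    have hp : (1:Int) ≤ 2 ^ k := one_le_pow₀ (by norm_num)
    rw [hpow] at h1 h2
    have hNgt : 3 < N := by omega
    have hdiv : PySem.Int.floordiv N 2 = N / 2 := PySem.Int.floordiv_eq_ediv_of_pos (by omega)
    have hb1 : 3 * 2 ^ k ≤ N / 2 := by omega
    have hb2 : N / 2 < 4 * 2 ^ k := by omega
    obtain ⟨hm, hrec⟩ := ih f' (N / 2) (by omega) hb1 hb2
    constructor
    · show (bChain (f' + 1) N).2 = 3
      rw [bChain]; simp only [if_pos hNgt]; rw [hdiv]; exact hm
    · show goA (f' + 1) N = _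
      rw [goA, bChain]
      simp only [if_neg (by omega : ¬ N = 3), if_pos hNgt]
      rw [stepA_eq_bStep, hdiv, hrec, List.reverse_cons, List.foldl_append]
      rfl

-- ===== VERDICT (by name: the statement is the Claim_ definition above) =====
theorem cause_youre_my_star_spec : Claim_equal_cause_youre_my_star := by
  intro N _ ⟨k, hk, h1, h2⟩
  obtain ⟨hm, heq⟩ := chain_eq k 64 N (by omega) h1 h2
  unfold Spec_cause_youre_my_star cause_youre_my_star cause_youre_my_star_alt
  simp only [hm]
  exact heq
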